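-- pv_equiv track=rewrite | github.com/gle-bellier/internship-expressive-DDSP | dataset/dataset_analysis.py | get_onsets
-- ===== SOURCE A (Python) =====
-- def get_onsets(frames):
--     note = {"start": None, "end": None}
--     onsets = []
--
--     for i in range(len(frames)):
--         if frames[i] and note["start"] is None:
--             note["start"] = i
--         elif not frames[i] and note["start"] is not None:  # note turned off
--             note["end"] = i
--             onsets.append(note)
--             note = {"start": None, "end": None}
--     return onsets
-- ===== SOURCE B (Python) =====
-- def get_onsets(frames):
--     prevs = [False] + frames[:-1]
--     pairs = list(enumerate(zip(frames, prevs)))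
--     starts = [i for i, (f, p) in pairs if f and not p]
--     ends = [i for i, (f, p) in pairs if not f and p]
--     return [{"start": s, "end": e} for s, e in zip(starts, ends)]
-- ===== Notes on version B (the rewrite author's own statement) =====
-- stated objective: alternative
-- what changed: Replaces A's stateful scan (a mutable note dict carried through one loop) by two edge-detection comprehensions over (frame, previous-frame) pairs whose index lists are zipped into the notes; zip truncation drops a trailing open note exactly as A does.
import Mathlib
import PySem

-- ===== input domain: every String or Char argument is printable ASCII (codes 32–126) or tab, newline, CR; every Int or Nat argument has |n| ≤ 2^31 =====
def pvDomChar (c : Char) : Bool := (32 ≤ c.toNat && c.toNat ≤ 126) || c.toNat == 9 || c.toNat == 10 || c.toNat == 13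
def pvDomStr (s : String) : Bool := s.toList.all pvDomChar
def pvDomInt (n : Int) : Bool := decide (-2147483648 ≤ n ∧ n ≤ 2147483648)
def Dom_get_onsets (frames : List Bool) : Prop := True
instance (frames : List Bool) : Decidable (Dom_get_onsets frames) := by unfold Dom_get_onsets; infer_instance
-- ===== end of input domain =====

-- B replaces A's stateful loop by two edge-index comprehensions zipped together (objective: alternative decomposition, same cost).

-- ===== PORT A =====
-- the note dict {"start": s, "end": e}
def pvNote (s e : Option Int) : PySem.Dict String (Option Int) :=
  PySem.Dict.ofList [("start", s), ("end", e)]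

-- loop body of A; 'for i in range(len(frames)): frames[i]' is iterated as enumerate(frames) (same i, same frames[i])
def pvStepA (st : PySem.Dict String (Option Int) × List (List (String × Option Int)))
    (p : Int × Bool) : PySem.Dict String (Option Int) × List (List (String × Option Int)) :=
  let note := st.1
  let onsets := st.2
  if p.2 && (PySem.Dict.getD note "start" none == none) then
    (note.insert "start" (some p.1), onsets)
  else if !p.2 && !(PySem.Dict.getD note "start" none == none) then
    (pvNote none none, onsets ++ [(note.insert "end" (some p.1)).items])
  else
    (note, onsets)

def get_onsets (frames : List Bool) : List (List (String × Option Int)) :=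
  ((PySem.List.enumerate frames 0).foldl pvStepA (pvNote none none, [])).2

-- ===== PORT B =====
def get_onsets_alt (frames : List Bool) : List (List (String × Option Int)) :=
  let prevs : List Bool := false :: PySem.List.slice frames none (some (-1))  -- [False] + frames[:-1]
  let pairs := PySem.List.enumerate (frames.zip prevs) 0
  let starts := (pairs.filter (fun t => t.2.1 && !t.2.2)).map (·.1)
  let ends := (pairs.filter (fun t => !t.2.1 && t.2.2)).map (·.1)
  (starts.zip ends).map (fun q => [("start", some q.1), ("end", some q.2)])

-- ===== PRECONDITION & SPEC =====
def Spec_get_onsets (frames : List Bool) (out : List (List (String × Option Int))) : Prop := out = get_onsets_alt frames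
instance (frames : List Bool) (out : List (List (String × Option Int))) : Decidable (Spec_get_onsets frames out) := by unfold Spec_get_onsets; infer_instance

-- ===== CLAIM (what is proved, stated in full; the proofs are below) =====
def Claim_equal_get_onsets : Prop := ∀ (frames : List Bool), Dom_get_onsets frames → Spec_get_onsets frames (get_onsets frames)

-- ===== LEMMAS AND PROOFS =====

-- (start, end) pairs A's loop appends, starting at index i with pending start st
def pairsA : Int → Option Int → List Bool → List (Int × Int)
  | _, _, [] => []
  | i, none, f :: rest => if f then pairsA (i+1) (some i) rest else pairsA (i+1) none rest
  | i, some s, f :: rest => if f then pairsA (i+1) (some s) rest else (s, i) :: pairsA (i+1) none rest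

-- indices selected by p (current, previous), starting at index i with previous value prev
def pvSel (p : Bool → Bool → Bool) : Int → Bool → List Bool → List Int
  | _, _, [] => []
  | i, prev, f :: rest => (if p f prev then [i] else []) ++ pvSel p (i+1) f rest

theorem pvNote_getD (s e : Option Int) : PySem.Dict.getD (pvNote s e) "start" none = s := rfl

theorem pvNote_insert_start (s e v : Option Int) :
    (pvNote s e).insert "start" v = pvNote v e := rfl

theorem pvNote_insert_end_items (s e v : Option Int) :
    ((pvNote s e).insert "end" v).items = [("start", s), ("end", v)] := rfl

theorem zip_cons_dropLast (xs : List Bool) (prev : Bool) :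
    xs.zip (prev :: xs.dropLast) = xs.zip (prev :: xs) := by
  induction xs generalizing prev with
  | nil => rfl
  | cons x rest ih =>
    cases rest with
    | nil => rfl
    | cons y t =>
      simp only [List.dropLast_cons₂, List.zip_cons_cons]
      exact congrArg _ (ih x)

theorem sel_eq (p : Bool → Bool → Bool) (xs : List Bool) :
    ∀ (i : Int) (prev : Bool),
      ((PySem.List.enumerate (xs.zip (prev :: xs)) i).filter (fun t => p t.2.1 t.2.2)).map (·.1)
        = pvSel p i prev xs := by
  induction xs with
  | nil => intro i prev; rfl
  | cons f rest ih =>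
    intro i prev
    simp only [List.zip_cons_cons, PySem.List.enumerate_cons, List.filter_cons]
    by_cases h : p f prev
    · simp [h, pvSel, ih]
    · simp [h, pvSel, ih]

theorem pairsA_zip (xs : List Bool) :
    ∀ (i : Int),
      (pairsA i none xs
        = (pvSel (fun f prev => f && !prev) i false xs).zip
            (pvSel (fun f prev => !f && prev) i false xs))
      ∧ ∀ s, pairsA i (some s) xs
        = (s :: pvSel (fun f prev => f && !prev) i true xs).zip
            (pvSel (fun f prev => !f && prev) i true xs) := by
  induction xs with
  | nil => intro i; exact ⟨rfl, fun s => rfl⟩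
  | cons f rest ih =>
    intro i
    constructor
    · cases f with
      | true => simpa [pairsA, pvSel] using (ih (i+1)).2 i
      | false => simpa [pairsA, pvSel] using (ih (i+1)).1
    · intro s
      cases f with
      | true => simpa [pairsA, pvSel] using (ih (i+1)).2 s
      | false => simpa [pairsA, pvSel] using (ih (i+1)).1

theorem A_fold (xs : List Bool) :
    ∀ (i : Int) (s : Option Int) (acc : List (List (String × Option Int))),
      ((PySem.List.enumerate xs i).foldl pvStepA (pvNote s none, acc)).2
        = acc ++ (pairsA i s xs).map (fun q => [("start", some q.1), ("end", some q.2)]) := by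
  induction xs with
  | nil => intro i s acc; simp [PySem.List.enumerate_nil, pairsA]
  | cons f rest ih =>
    intro i s acc
    simp only [PySem.List.enumerate_cons, List.foldl_cons]
    cases s with
    | none =>
      cases f with
      | true =>
        have : pvStepA (pvNote none none, acc) (i, true) = (pvNote (some i) none, acc) := by
          simp [pvStepA, pvNote_getD, pvNote_insert_start]
        rw [this, ih (i+1) (some i) acc]
        simp [pairsA]
      | false =>
        have : pvStepA (pvNote none none, acc) (i, false) = (pvNote none none, acc) := by
          simp [pvStepA, pvNote_getD]
        rw [this, ih (i+1) none acc]
        simp [pairsA]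
    | some v =>
      cases f with
      | true =>
        have : pvStepA (pvNote (some v) none, acc) (i, true) = (pvNote (some v) none, acc) := by
          simp [pvStepA, pvNote_getD]
        rw [this, ih (i+1) (some v) acc]
        simp [pairsA]
      | false =>
        have : pvStepA (pvNote (some v) none, acc) (i, false)
            = (pvNote none none, acc ++ [[("start", some v), ("end", some i)]]) := by
          simp [pvStepA, pvNote_getD, pvNote_insert_end_items]
        rw [this, ih (i+1) none _]
        simp [pairsA]
  
theorem slice_neg_one (xs : List Bool) :
    PySem.List.slice xs none (some (-1)) = xs.dropLast := by
  simp [pysem, List.dropLast_eq_take]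

-- ===== VERDICT (by name: the statement is the Claim_ definition above) =====
theorem get_onsets_spec : Claim_equal_get_onsets := by
  intro frames _
  simp only [Spec_get_onsets, get_onsets, get_onsets_alt]
  rw [slice_neg_one, zip_cons_dropLast, A_fold, sel_eq (fun f prev => f && !prev) frames 0 false, sel_eq (fun f prev => !f && prev) frames 0 false, (pairsA_zip frames 0).1]
  simp
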